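-- pv_equiv track=rewrite | github.com/caviumnetworks/dpdk-dts | tests/TestSuite_l2fwd_crypto.py | __gen_key
-- ===== SOURCE A (Python) =====
-- def __gen_key(length, pattern=None, mask="000000"):
--     base_key = "000102030405060708090a0b0c0d0e0f"
--     key = ""
--     n = length // 16
--     for i in range(n):
--         key = key + base_key
--         base_key = base_key[2:] + base_key[0:2]
--     m = length % 16
--     key = key + base_key[0:2*m]
--     return key
-- ===== SOURCE B (Python) =====
-- def __gen_key(length, pattern=None, mask="000000"):
--     # byte at position p of the key is (p + p // 16) % 16
--     return ''.join('%02x' % ((p + p // 16) % 16) for p in range(length))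
-- ===== Notes on version B (the rewrite author's own statement) =====
-- stated objective: simpler
-- what changed: Replaces the rotating base_key string and repeated concatenation with a stateless closed form: byte p of the key is (p + p//16) % 16, formatted directly in one join over byte positions.
-- intended difference: For negative lengths not divisible by 16 A's floor division/modulo make it return a nonempty tail of the base pattern (2*(length%16) hex chars); B returns the empty string, the intended key of nonpositive length. — e.g. on __gen_key(-1, none, "000000"): A returns "000102030405060708090a0b0c0d0e", B returns ""
import Mathlib
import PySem

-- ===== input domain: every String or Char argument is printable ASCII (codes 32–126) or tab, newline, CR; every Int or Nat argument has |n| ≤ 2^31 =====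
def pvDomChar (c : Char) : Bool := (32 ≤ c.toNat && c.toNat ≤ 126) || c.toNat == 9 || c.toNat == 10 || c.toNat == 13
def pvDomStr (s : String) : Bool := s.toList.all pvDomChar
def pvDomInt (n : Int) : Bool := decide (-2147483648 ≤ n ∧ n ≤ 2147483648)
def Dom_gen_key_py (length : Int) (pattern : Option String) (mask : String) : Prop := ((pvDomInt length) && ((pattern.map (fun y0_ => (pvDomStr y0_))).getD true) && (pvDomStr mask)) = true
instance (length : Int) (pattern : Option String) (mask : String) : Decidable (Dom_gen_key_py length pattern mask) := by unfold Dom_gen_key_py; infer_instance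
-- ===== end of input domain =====

-- B replaces A's rotating base_key and repeated concatenation by a stateless closed form:
-- byte p of the key is (p + p // 16) % 16, emitted in one join over byte positions (objective: simpler).


-- ===== PORT A =====
def gen_key_py (length : Int) (pattern : Option String) (mask : String) : String :=
  let base_key : List Char := "000102030405060708090a0b0c0d0e0f".toList
  let key : List Char := []
  let n := PySem.Int.floordiv length 16
  let st :=
    (PySem.List.pyRange 0 n 1).foldl
      (fun (st : List Char × List Char) _ =>
        (st.1 ++ st.2,
         PySem.Chars.slice st.2 (some 2) none ++ PySem.Chars.slice st.2 (some 0) (some 2)))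
      (key, base_key)
  let m := PySem.Int.mod length 16
  String.ofList (st.1 ++ PySem.Chars.slice st.2 (some 0) (some (2 * m)))

-- ===== PORT B =====
-- '%02x' % v for 0 ≤ v ≤ 15 (the only values B formats): '0' followed by the hex digit; exact on that range
def pvByteHex (v : Int) : List Char := ['0', ("0123456789abcdef".toList).getD v.toNat '0']

def gen_key_py_alt (length : Int) (pattern : Option String) (mask : String) : String :=
  String.ofList (PySem.Chars.join []
    ((PySem.List.pyRange 0 length 1).map
      (fun p => pvByteHex (PySem.Int.mod (p + PySem.Int.floordiv p 16) 16))))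

-- ===== PRECONDITION & SPEC =====
-- For negative lengths not divisible by 16 A's floor division/modulo make it return a nonempty
-- tail of the base pattern (2*(length%16) hex chars); B returns the empty string, the intended
-- key of nonpositive length.
def D_gen_key_py (length : Int) (pattern : Option String) (mask : String) : Prop :=
  length < 0 ∧ PySem.Int.mod length 16 ≠ 0
instance (length : Int) (pattern : Option String) (mask : String) : Decidable (D_gen_key_py length pattern mask) := by unfold D_gen_key_py; infer_instance

def Spec_gen_key_py (length : Int) (pattern : Option String) (mask : String) (out : String) : Prop := ¬ D_gen_key_py length pattern mask → out = gen_key_py_alt length pattern mask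
instance (length : Int) (pattern : Option String) (mask : String) (out : String) : Decidable (Spec_gen_key_py length pattern mask out) := by unfold Spec_gen_key_py; infer_instance

def pvDiffWitness_gen_key_py : Int × Option String × String := (-1, none, "000000")
def pvDiffWitnessOut_gen_key_py : String × String := ("000102030405060708090a0b0c0d0e", "")

-- ===== CLAIM (what is proved, stated in full; the proofs are below) =====
def Claim_unchanged_gen_key_py : Prop := ∀ (length : Int) (pattern : Option String) (mask : String), Dom_gen_key_py length pattern mask → Spec_gen_key_py length pattern mask (gen_key_py length pattern mask)
def Claim_changed_gen_key_py : Prop := Dom_gen_key_py (pvDiffWitness_gen_key_py.1) (pvDiffWitness_gen_key_py.2.1) (pvDiffWitness_gen_key_py.2.2) ∧ D_gen_key_py (pvDiffWitness_gen_key_py.1) (pvDiffWitness_gen_key_py.2.1) (pvDiffWitness_gen_key_py.2.2) ∧ gen_key_py (pvDiffWitness_gen_key_py.1) (pvDiffWitness_gen_key_py.2.1) (pvDiffWitness_gen_key_py.2.2) = pvDiffWitnessOut_gen_key_py.1 ∧ gen_key_py_alt (pvDiffWitness_gen_key_py.1) (pvDiffWitness_gen_key_py.2.1) (pvDiffWitness_gen_key_py.2.2)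 = pvDiffWitnessOut_gen_key_py.2 ∧ pvDiffWitnessOut_gen_key_py.1 ≠ pvDiffWitnessOut_gen_key_py.2
def Claim_exact_gen_key_py : Prop := ∀ (length : Int) (pattern : Option String) (mask : String), Dom_gen_key_py length pattern mask → D_gen_key_py length pattern mask → gen_key_py length pattern mask ≠ gen_key_py_alt length pattern mask

-- ===== LEMMAS AND PROOFS =====

-- A's base_key after k rotations
def pvRot : Nat → List Char
  | 0 => "000102030405060708090a0b0c0d0e0f".toList
  | k+1 => PySem.Chars.slice (pvRot k) (some 2) none ++ PySem.Chars.slice (pvRot k) (some 0) (some 2)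

-- B's byte at position p
def pvBody (p : Nat) : List Char := pvByteHex (((p + p / 16) % 16 : Nat) : Int)

-- B's key over the first t byte positions
def pvKey (t : Nat) : List Char := ((List.range t).map pvBody).flatten

-- the first m bytes of the k-rotated base pattern, written as B writes them
def pvSeg (k m : Nat) : List Char :=
  ((List.range m).map (fun j => pvByteHex (((j + k) % 16 : Nat) : Int))).flatten

lemma pv_join_nil_flatten (parts : List (List Char)) : PySem.Chars.join [] parts = parts.flatten := by
  show List.intercalate [] parts = parts.flatten
  induction parts with
  | nil => rfl
  | cons h t ih =>
    cases t with
    | nil => simp [List.intercalate]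
    | cons a b =>
      simp only [List.intercalate] at *
      simp_all [List.intersperse]

lemma pvRot_succ (n : Nat) :
    pvRot (n + 1)
      = PySem.Chars.slice (pvRot n) (some 2) none ++ PySem.Chars.slice (pvRot n) (some 0) (some 2) := rfl

lemma pvRot_period (k : Nat) : pvRot (k + 16) = pvRot k := by
  induction k with
  | zero => decide
  | succ k ih =>
    have h : k + 1 + 16 = (k + 16) + 1 := by omega
    rw [h, pvRot_succ (k + 16), pvRot_succ k, ih]

lemma pvRot_mod (k : Nat) : pvRot k = pvRot (k % 16) := by
  induction k using Nat.strong_induction_on with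
  | _ k ih =>
    by_cases h : k < 16
    · rw [Nat.mod_eq_of_lt h]
    · have hk : k - 16 + 16 = k := by omega
      rw [← hk, pvRot_period, ih (k - 16) (by omega)]
      congr 1
      omega

lemma pvSeg_mod (k m : Nat) : pvSeg k m = pvSeg (k % 16) m := by
  have h : ∀ j : Nat, (j + k) % 16 = (j + k % 16) % 16 := fun j => by omega
  unfold pvSeg
  congr 1
  apply List.map_congr_left
  intro j _
  rw [h j]

lemma pvTake_eq (k m : Nat) (hm : m ≤ 16) : (pvRot k).take (2 * m) = pvSeg k m := by
  rw [pvRot_mod, pvSeg_mod]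
  have hr : k % 16 < 16 := Nat.mod_lt _ (by omega)
  interval_cases h : k % 16 <;> interval_cases m <;> decide

lemma pvChunk_eq (k : Nat) : pvRot k = pvSeg k 16 := by
  rw [pvRot_mod, pvSeg_mod]
  have hr : k % 16 < 16 := Nat.mod_lt _ (by omega)
  interval_cases h : k % 16 <;> decide

lemma pvKey_split (N M : Nat) (hM : M ≤ 16) : pvKey (16 * N + M) = pvKey (16 * N) ++ pvSeg N M := by
  unfold pvKey pvSeg
  rw [List.range_add, List.map_append, List.flatten_append]
  congr 1
  rw [List.map_map]
  congr 1
  apply List.map_congr_left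
  intro j hj
  have hj16 : j < 16 := by
    have := List.mem_range.mp hj
    omega
  simp only [Function.comp]
  unfold pvBody
  congr 2
  omega

lemma pvLoop (N : Nat) :
    (PySem.List.pyRange 0 (N : Int) 1).foldl
      (fun (st : List Char × List Char) _ =>
        (st.1 ++ st.2,
         PySem.Chars.slice st.2 (some 2) none ++ PySem.Chars.slice st.2 (some 0) (some 2)))
      ([], "000102030405060708090a0b0c0d0e0f".toList)
    = (pvKey (16 * N), pvRot N) := by
  induction N with
  | zero =>
    rw [PySem.List.pyRange_one_eq_nil (by omega)]
    rfl
  | succ N ih =>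
    have hcast : ((N + 1 : Nat) : Int) = (N : Int) + 1 := by push_cast; ring
    rw [hcast, PySem.List.pyRange_one_succ_right (by positivity), List.foldl_append, ih]
    simp only [List.foldl]
    have hkey : pvKey (16 * (N + 1)) = pvKey (16 * N) ++ pvRot N := by
      have h : 16 * (N + 1) = 16 * N + 16 := by ring
      rw [h, pvKey_split N 16 (le_refl 16), pvChunk_eq]
    rw [hkey]
    rfl

lemma pvF_cast (k : Nat) :
    pvByteHex (PySem.Int.mod ((k : Int) + PySem.Int.floordiv (k : Int) 16) 16) = pvBody k := by
  have h16 : (16 : Int) = ((16 : Nat) : Int) := by norm_num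
  rw [h16, PySem.Int.floordiv_natCast,
      show (k : Int) + ((k / 16 : Nat) : Int) = ((k + k / 16 : Nat) : Int) by push_cast; ring,
      PySem.Int.mod_natCast]
  rfl

-- B's key over the first t positions equals pvKey t
lemma pvAlt_eq (t : Nat) :
    PySem.Chars.join []
      ((PySem.List.pyRange 0 (t : Int) 1).map
        (fun p => pvByteHex (PySem.Int.mod (p + PySem.Int.floordiv p 16) 16)))
    = pvKey t := by
  rw [PySem.List.pyRange_zero_natCast, List.map_map, pv_join_nil_flatten]
  unfold pvKey
  congr 1
  apply List.map_congr_left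
  intro k _
  simp only [Function.comp]
  exact pvF_cast k

-- B returns the empty string on every nonpositive length
lemma pvAlt_nonpos (length : Int) (pattern : Option String) (mask : String) (h : length ≤ 0) :
    gen_key_py_alt length pattern mask = "" := by
  unfold gen_key_py_alt
  rw [PySem.List.pyRange_one_eq_nil (by omega)]
  rfl

-- A on a negative length returns the first (length % 16) bytes of the base pattern
lemma pvA_neg (length : Int) (pattern : Option String) (mask : String) (h : length < 0) :
    gen_key_py length pattern mask
      = String.ofList
          (PySem.Chars.slice ("000102030405060708090a0b0c0d0e0f".toList)
            (some 0) (some (2 * PySem.Int.mod length 16))) := by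
  unfold gen_key_py
  have hn : PySem.Int.floordiv length 16 ≤ 0 := by
    have hm0 : 0 ≤ PySem.Int.mod length 16 := PySem.Int.mod_nonneg length (by omega)
    have hlen := PySem.Int.floordiv_mul_add_mod length 16
    nlinarith
  dsimp only
  rw [PySem.List.pyRange_one_eq_nil (by omega)]
  rfl

-- ===== VERDICT (by name: the statement is the Claim_ definition above) =====
theorem gen_key_py_spec : Claim_unchanged_gen_key_py := by
  intro length pattern mask _hdom hnd
  unfold D_gen_key_py at hnd
  push_neg at hnd
  by_cases hpos : 0 ≤ length
  · -- nonnegative length: both produce 16*N + M bytes of the pattern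
    unfold gen_key_py gen_key_py_alt
    dsimp only
    have hm0 : 0 ≤ PySem.Int.mod length 16 := PySem.Int.mod_nonneg length (by omega)
    have hm16 : PySem.Int.mod length 16 < 16 := PySem.Int.mod_lt length (by omega)
    have hlen : PySem.Int.floordiv length 16 * 16 + PySem.Int.mod length 16 = length :=
      PySem.Int.floordiv_mul_add_mod length 16
    obtain ⟨M, hM⟩ : ∃ M : Nat, PySem.Int.mod length 16 = (M : Int) :=
      ⟨(PySem.Int.mod length 16).toNat, (Int.toNat_of_nonneg hm0).symm⟩
    have hM16 : M ≤ 16 := by omega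
    have hn0 : 0 ≤ PySem.Int.floordiv length 16 := by nlinarith
    obtain ⟨N, hN⟩ : ∃ N : Nat, PySem.Int.floordiv length 16 = (N : Int) :=
      ⟨(PySem.Int.floordiv length 16).toNat, (Int.toNat_of_nonneg hn0).symm⟩
    have hlen' : length = ((16 * N + M : Nat) : Int) := by push_cast; omega
    rw [hM, hN, pvLoop N]
    dsimp only
    have hslice : PySem.Chars.slice (pvRot N) (some 0) (some (2 * (M : Int))) = pvSeg N M := by
      rw [PySem.Chars.slice_eq_listSlice, PySem.List.slice_zero_start,
          show (2 * (M : Int)) = ((2 * M : Nat) : Int) by push_cast; ring,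
          PySem.List.slice_to_natCast, pvTake_eq N M hM16]
    rw [hlen', pvAlt_eq, hslice, pvKey_split N M hM16]
  · -- negative length outside D_: length % 16 = 0, both return ""
    have hneg : length < 0 := by omega
    have hm : PySem.Int.mod length 16 = 0 := hnd hneg
    rw [pvA_neg length pattern mask hneg, pvAlt_nonpos length pattern mask (by omega), hm]
    rfl

theorem gen_key_py_changed : Claim_changed_gen_key_py := by
  unfold Claim_changed_gen_key_py; decide

theorem gen_key_py_tight : Claim_exact_gen_key_py := by
  intro length pattern mask _hdom hd
  obtain ⟨hneg, hm⟩ := hd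
  have hm0 : 0 ≤ PySem.Int.mod length 16 := PySem.Int.mod_nonneg length (by omega)
  have hm16 : PySem.Int.mod length 16 < 16 := PySem.Int.mod_lt length (by omega)
  rw [pvA_neg length pattern mask hneg, pvAlt_nonpos length pattern mask (by omega)]
  intro hEq
  have hlist := congrArg String.toList hEq
  simp only [PySem.Chars.slice_eq_listSlice, PySem.List.slice_zero_start] at hlist
  obtain ⟨M, hM⟩ : ∃ M : Nat, PySem.Int.mod length 16 = (M : Int) :=
    ⟨(PySem.Int.mod length 16).toNat, (Int.toNat_of_nonneg hm0).symm⟩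
  rw [hM, show (2 * (M : Int)) = ((2 * M : Nat) : Int) by push_cast; ring,
      PySem.List.slice_to_natCast] at hlist
  have hM1 : 1 ≤ M := by omega
  have hlen : (("000102030405060708090a0b0c0d0e0f".toList).take (2 * M)).length = 2 * M := by
    rw [List.length_take]
    have : ("000102030405060708090a0b0c0d0e0f".toList).length = 32 := by decide
    omega
  have : (String.toList (String.ofList (("000102030405060708090a0b0c0d0e0f".toList).take (2 * M)))).length = 0 := by
    rw [hlist]; rfl
  simp only [String.toList_ofList] at this
  omega
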